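-- pv_equiv track=rewrite | github.com/SongTaehwan/algorithm-collection | Python/Backjoon/2864.py | calc
-- ===== SOURCE A (Python) =====
-- def calc(n):
--     mn = 0
--     mx = 0
--     i = 1
--
--     while n > 0:
--         m = n % 10
--
--         if m == 5:
--             mn += 5 * i
--             mx += 6 * i
--         elif m == 6:
--             mn += 5 * i
--             mx += 6 * i
--         else:
--             mn += m * i
--             mx += m * i
--
--         n //= 10
--         i *= 10
--
--     return [mn, mx]
-- ===== SOURCE B (Python) =====
-- def calc(n):
--     if n <= 0:
--         return [0, 0]
--     mn, mx = calc(n // 10)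
--     d = n % 10
--     if d == 5 or d == 6:
--         return [mn * 10 + 5, mx * 10 + 6]
--     return [mn * 10 + d, mx * 10 + d]
-- ===== Notes on version B (the rewrite author's own statement) =====
-- stated objective: simpler
-- what changed: Replaces A's iterative least-significant-first loop with a power-of-ten accumulator by a direct recursion on the quotient that builds both results most-significant-first as result times base plus digit, eliminating the accumulator and merging the two identical digit branches.
import Mathlib
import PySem

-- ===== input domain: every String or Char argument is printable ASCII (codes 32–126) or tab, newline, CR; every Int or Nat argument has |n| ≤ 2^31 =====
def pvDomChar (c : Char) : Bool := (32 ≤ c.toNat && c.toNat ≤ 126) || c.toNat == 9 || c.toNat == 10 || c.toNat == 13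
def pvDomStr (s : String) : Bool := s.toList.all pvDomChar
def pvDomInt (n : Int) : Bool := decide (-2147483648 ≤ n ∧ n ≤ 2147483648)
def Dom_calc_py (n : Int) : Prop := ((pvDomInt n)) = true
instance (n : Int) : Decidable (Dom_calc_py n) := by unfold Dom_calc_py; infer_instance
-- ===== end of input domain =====

-- B replaces A's least-significant-first loop with its power-of-ten accumulator by a
-- direct recursion on the quotient building the results most-significant-first (objective: simpler).

-- ===== PORT A =====
def calcLoop (n mn mx i : Int) : List Int :=
  if 0 < n then
    let m := PySem.Int.mod n 10
    if m = 5 then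
      calcLoop (PySem.Int.floordiv n 10) (mn + 5 * i) (mx + 6 * i) (i * 10)
    else if m = 6 then
      calcLoop (PySem.Int.floordiv n 10) (mn + 5 * i) (mx + 6 * i) (i * 10)
    else
      calcLoop (PySem.Int.floordiv n 10) (mn + m * i) (mx + m * i) (i * 10)
  else
    [mn, mx]
termination_by n.toNat
decreasing_by
  all_goals
    rw [PySem.Int.floordiv_eq_ediv_of_pos (by norm_num : (0:Int) < 10)]
    omega

def calc_py (n : Int) : List Int := calcLoop n 0 0 1

-- ===== PORT B =====
def calc_py_alt (n : Int) : List Int :=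
  if n ≤ 0 then
    [0, 0]
  else
    -- mn, mx = calc(n // 10)
    let r := calc_py_alt (PySem.Int.floordiv n 10)
    let mn := PySem.List.pyGetD r 0 0
    let mx := PySem.List.pyGetD r 1 0
    let d := PySem.Int.mod n 10
    if d = 5 ∨ d = 6 then
      [mn * 10 + 5, mx * 10 + 6]
    else
      [mn * 10 + d, mx * 10 + d]
termination_by n.toNat
decreasing_by
  rw [PySem.Int.floordiv_eq_ediv_of_pos (by norm_num : (0:Int) < 10)]
  omega

-- ===== PRECONDITION & SPEC =====
def Spec_calc_py (n : Int) (out : List Int) : Prop := out = calc_py_alt n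
instance (n : Int) (out : List Int) : Decidable (Spec_calc_py n out) := by unfold Spec_calc_py; infer_instance

-- ===== CLAIM (what is proved, stated in full; the proofs are below) =====
def Claim_equal_calc_py : Prop := ∀ (n : Int), Dom_calc_py n → Spec_calc_py n (calc_py n)

-- ===== LEMMAS AND PROOFS =====

-- calc_py_alt always returns a two-element list (both branches do literally).
theorem alt_shape (n : Int) : ∃ a b, calc_py_alt n = [a, b] := by
  rw [calc_py_alt]
  split
  · exact ⟨0, 0, rfl⟩
  · dsimp only
    split <;> exact ⟨_, _, rfl⟩

-- A's loop adds i times B's two results to its accumulators.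
theorem loop_eq (N : Nat) : ∀ n : Int, n.toNat ≤ N → ∀ mn mx i : Int,
    calcLoop n mn mx i =
      [mn + i * PySem.List.pyGetD (calc_py_alt n) 0 0,
       mx + i * PySem.List.pyGetD (calc_py_alt n) 1 0] := by
  induction N with
  | zero =>
    intro n hn mn mx i
    have hle : n ≤ 0 := by omega
    rw [calcLoop, if_neg (by omega), calc_py_alt, if_pos hle]
    simp [PySem.List.pyGetD]
  | succ N ih =>
    intro n hn mn mx i
    by_cases hpos : 0 < n
    · have h10 : (0:Int) < 10 := by norm_num
      have hq : PySem.Int.floordiv n 10 = n / 10 :=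
        PySem.Int.floordiv_eq_ediv_of_pos h10
      have hm : PySem.Int.mod n 10 = n % 10 :=
        PySem.Int.mod_eq_emod_of_pos h10
      have hqN : (PySem.Int.floordiv n 10).toNat ≤ N := by rw [hq]; omega
      obtain ⟨a, b, hab⟩ := alt_shape (PySem.Int.floordiv n 10)
      have halt : calc_py_alt n =
          if PySem.Int.mod n 10 = 5 ∨ PySem.Int.mod n 10 = 6 then
            [a * 10 + 5, b * 10 + 6]
          else
            [a * 10 + PySem.Int.mod n 10, b * 10 + PySem.Int.mod n 10] := by
        rw [calc_py_alt, if_neg (by omega), hab]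
        simp [PySem.List.pyGetD]
      rw [calcLoop, if_pos hpos]
      by_cases h5 : PySem.Int.mod n 10 = 5
      · rw [if_pos h5, ih _ hqN, hab, halt, if_pos (Or.inl h5)]
        simp [PySem.List.pyGetD]; constructor <;> ring
      · rw [if_neg h5]
        by_cases h6 : PySem.Int.mod n 10 = 6
        · rw [if_pos h6, ih _ hqN, hab, halt, if_pos (Or.inr h6)]
          simp [PySem.List.pyGetD]; constructor <;> ring
        · rw [if_neg h6, ih _ hqN, hab, halt,
              if_neg (by rintro (h | h) <;> [exact h5 h; exact h6 h])]
          simp [PySem.List.pyGetD]; constructor <;> ring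
    · have hle : n ≤ 0 := by omega
      rw [calcLoop, if_neg hpos, calc_py_alt, if_pos hle]
      simp [PySem.List.pyGetD]

-- ===== VERDICT (by name: the statement is the Claim_ definition above) =====
theorem calc_py_spec : Claim_equal_calc_py := by
  intro n _
  unfold Spec_calc_py calc_py
  obtain ⟨a, b, hab⟩ := alt_shape n
  rw [loop_eq n.toNat n le_rfl, hab]
  simp [PySem.List.pyGetD]
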